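-- pv_equiv track=rewrite | github.com/FabianM1-debug/medicine-quiz | medizinquiz2.py | calculate_specialty
-- ===== SOURCE A (Python) =====
-- def calculate_specialty(answers):
--     points = {
--         "Emergency Medicine": 0,
--         "Surgery": 0,
--         "Neurology": 0,
--         "Psychiatry": 0,
--         "Cardiology": 0,
--         "Radiology": 0,
--         "General Medicine": 0,
--         "Dermatology": 0,
--         "Pathology": 0,
--         "Tropical Medicine": 0,
--         "Human Genetics": 0,
--         "Military Medicine": 0,
--         "Robotic Surgery": 0,
--         "Naturopathy": 0,
--         "Forensic Medicine": 0,
--         "Rehabilitation Medicine": 0,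
--         "Geriatrics": 0,
--         "Occupational Medicine": 0,
--         "Pharmacology": 0,
--         "Public Health": 0,
--         "Aerospace Medicine": 0,
--     }
--
--     for key, value in answers.items():
--         if value:
--             if key in ["quick decisions", "high-pressure work"]:
--                 points["Emergency Medicine"] += 2
--             if key in ["analytical thinking", "problem-solving"]:
--                 points["Neurology"] += 2
--                 points["Radiology"] += 2
--             if key in ["patient interaction", "long-term care"]:
--                 points["General Medicine"] += 2
--                 points["Psychiatry"] += 2
--             if key in ["operative procedures", "hands-on work"]:
--                 points["Surgery"] += 2
--                 points["Robotic Surgery"] += 1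
--             if key in ["no night shifts", "structured work hours"]:
--                 points["Dermatology"] += 2
--                 points["Radiology"] += 1
--             if key in ["infectious diseases"]:
--                 points["Tropical Medicine"] += 2
--             if key in ["genetics"]:
--                 points["Human Genetics"] += 2
--             if key in ["military medicine"]:
--                 points["Military Medicine"] += 2
--             if key in ["rehabilitation"]:
--                 points["Rehabilitation Medicine"] += 2
--             if key in ["geriatrics"]:
--                 points["Geriatrics"] += 2
--             if key in ["occupational medicine"]:
--                 points["Occupational Medicine"] += 2
--             if key in ["public health"]:
--                 points["Public Health"] += 2
--             if key in ["pharmacology"]: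
--                 points["Pharmacology"] += 2
--             if key in ["aerospace medicine"]:
--                 points["Aerospace Medicine"] += 2
--
--     best_fit = max(points, key=points.get)
--     return best_fit
-- ===== SOURCE B (Python) =====
-- SPECIALTIES = [
--     "Emergency Medicine", "Surgery", "Neurology", "Psychiatry", "Cardiology",
--     "Radiology", "General Medicine", "Dermatology", "Pathology",
--     "Tropical Medicine", "Human Genetics", "Military Medicine",
--     "Robotic Surgery", "Naturopathy", "Forensic Medicine",
--     "Rehabilitation Medicine", "Geriatrics", "Occupational Medicine",
--     "Pharmacology", "Public Health", "Aerospace Medicine",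
-- ]
--
-- RULES = {
--     "quick decisions": (("Emergency Medicine", 2),),
--     "high-pressure work": (("Emergency Medicine", 2),),
--     "analytical thinking": (("Neurology", 2), ("Radiology", 2)),
--     "problem-solving": (("Neurology", 2), ("Radiology", 2)),
--     "patient interaction": (("General Medicine", 2), ("Psychiatry", 2)),
--     "long-term care": (("General Medicine", 2), ("Psychiatry", 2)),
--     "operative procedures": (("Surgery", 2), ("Robotic Surgery", 1)),
--     "hands-on work": (("Surgery", 2), ("Robotic Surgery", 1)),
--     "no night shifts": (("Dermatology", 2), ("Radiology", 1)),
--     "structured work hours": (("Dermatology", 2), ("Radiology", 1)),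
--     "infectious diseases": (("Tropical Medicine", 2),),
--     "genetics": (("Human Genetics", 2),),
--     "military medicine": (("Military Medicine", 2),),
--     "rehabilitation": (("Rehabilitation Medicine", 2),),
--     "geriatrics": (("Geriatrics", 2),),
--     "occupational medicine": (("Occupational Medicine", 2),),
--     "public health": (("Public Health", 2),),
--     "pharmacology": (("Pharmacology", 2),),
--     "aerospace medicine": (("Aerospace Medicine", 2),),
-- }
--
--
-- def calculate_specialty(answers):
--     # Transposed computation: flatten the truthy answers into one list of
--     # (specialty, points) deltas, then score each specialty independently
--     # and keep a running argmax (first specialty wins ties).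
--     deltas = [d for k, v in answers.items() if v for d in RULES.get(k, ())]
--     best = None
--     best_score = 0
--     for s in SPECIALTIES:
--         score = sum(p for sp, p in deltas if sp == s)
--         if best is None or score > best_score:
--             best, best_score = s, score
--     return best
-- ===== Notes on version B (the rewrite author's own statement) =====
-- stated objective: alternative
-- what changed: B transposes the computation: instead of A's mutable points dict updated by a 19-branch if-chain and a final max(points, key=points.get), B flattens the truthy answers into one list of (specialty, points) deltas via a rules table, then scores each of the 21 specialties independently and keeps a running argmax (first specialty wins ties), using no points dict at all.
import Mathlib
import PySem

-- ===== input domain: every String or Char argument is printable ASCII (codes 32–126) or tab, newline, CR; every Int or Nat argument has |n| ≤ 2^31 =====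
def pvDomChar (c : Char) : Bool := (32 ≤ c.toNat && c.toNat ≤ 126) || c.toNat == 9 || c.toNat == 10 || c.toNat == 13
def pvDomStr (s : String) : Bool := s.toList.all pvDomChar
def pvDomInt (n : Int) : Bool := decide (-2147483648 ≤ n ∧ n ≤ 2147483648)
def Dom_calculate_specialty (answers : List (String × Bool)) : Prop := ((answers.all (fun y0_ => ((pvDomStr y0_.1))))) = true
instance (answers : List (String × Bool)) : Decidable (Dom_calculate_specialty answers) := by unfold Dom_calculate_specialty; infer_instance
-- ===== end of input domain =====

-- B transposes the computation: instead of A's running points dict updated by an if-chain and a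
-- final max(points, key=points.get), B flattens the truthy answers into one list of
-- (specialty, points) deltas and scores each specialty independently in a running argmax scan;
-- objective: alternative. Return-value equivalence only.

-- ===== PORT A =====
-- the literal initial points dict of A
def initPointsA : PySem.Dict String Int := PySem.Dict.mk [
  ("Emergency Medicine", 0),
  ("Surgery", 0),
  ("Neurology", 0),
  ("Psychiatry", 0),
  ("Cardiology", 0),
  ("Radiology", 0),
  ("General Medicine", 0),
  ("Dermatology", 0),
  ("Pathology", 0),
  ("Tropical Medicine", 0),
  ("Human Genetics", 0),
  ("Military Medicine", 0),
  ("Robotic Surgery", 0),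
  ("Naturopathy", 0),
  ("Forensic Medicine", 0),
  ("Rehabilitation Medicine", 0),
  ("Geriatrics", 0),
  ("Occupational Medicine", 0),
  ("Pharmacology", 0),
  ("Public Health", 0),
  ("Aerospace Medicine", 0)]

-- the body of A's 'if value:' block: the chain of 'if key in [...]' branches, in source order
def stepA (pts : PySem.Dict String Int) (key : String) : PySem.Dict String Int :=
  let pts := if key = "quick decisions" ∨ key = "high-pressure work" then
      pts.modify "Emergency Medicine" 0 (· + 2) else pts
  let pts := if key = "analytical thinking" ∨ key = "problem-solving" then
      (pts.modify "Neurology" 0 (· + 2)).modify "Radiology" 0 (· + 2) else pts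
  let pts := if key = "patient interaction" ∨ key = "long-term care" then
      (pts.modify "General Medicine" 0 (· + 2)).modify "Psychiatry" 0 (· + 2) else pts
  let pts := if key = "operative procedures" ∨ key = "hands-on work" then
      (pts.modify "Surgery" 0 (· + 2)).modify "Robotic Surgery" 0 (· + 1) else pts
  let pts := if key = "no night shifts" ∨ key = "structured work hours" then
      (pts.modify "Dermatology" 0 (· + 2)).modify "Radiology" 0 (· + 1) else pts
  let pts := if key = "infectious diseases" then pts.modify "Tropical Medicine" 0 (· + 2) else pts
  let pts := if key = "genetics" then pts.modify "Human Genetics" 0 (· + 2) else pts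
  let pts := if key = "military medicine" then pts.modify "Military Medicine" 0 (· + 2) else pts
  let pts := if key = "rehabilitation" then pts.modify "Rehabilitation Medicine" 0 (· + 2) else pts
  let pts := if key = "geriatrics" then pts.modify "Geriatrics" 0 (· + 2) else pts
  let pts := if key = "occupational medicine" then pts.modify "Occupational Medicine" 0 (· + 2) else pts
  let pts := if key = "public health" then pts.modify "Public Health" 0 (· + 2) else pts
  let pts := if key = "pharmacology" then pts.modify "Pharmacology" 0 (· + 2) else pts
  let pts := if key = "aerospace medicine" then pts.modify "Aerospace Medicine" 0 (· + 2) else pts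
  pts

def calculate_specialty (answers : List (String × Bool)) : String :=
  let points := answers.foldl (fun pts kv => if kv.2 then stepA pts kv.1 else pts) initPointsA
  -- max(points, key=points.get): first key (insertion order) with the maximal value
  (PySem.List.max? points.keys (fun k => points.getD k 0)).getD ""

-- ===== PORT B =====
def specialtiesB : List String := [
  "Emergency Medicine", "Surgery", "Neurology", "Psychiatry", "Cardiology", "Radiology",
  "General Medicine", "Dermatology", "Pathology", "Tropical Medicine", "Human Genetics",
  "Military Medicine", "Robotic Surgery", "Naturopathy", "Forensic Medicine",
  "Rehabilitation Medicine", "Geriatrics", "Occupational Medicine", "Pharmacology",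
  "Public Health", "Aerospace Medicine"]

-- literal rules dict: answer key ↦ its (specialty, points) deltas
def rulesB : PySem.Dict String (List (String × Int)) := PySem.Dict.mk [
  ("quick decisions", [("Emergency Medicine", 2)]),
  ("high-pressure work", [("Emergency Medicine", 2)]),
  ("analytical thinking", [("Neurology", 2), ("Radiology", 2)]),
  ("problem-solving", [("Neurology", 2), ("Radiology", 2)]),
  ("patient interaction", [("General Medicine", 2), ("Psychiatry", 2)]),
  ("long-term care", [("General Medicine", 2), ("Psychiatry", 2)]),
  ("operative procedures", [("Surgery", 2), ("Robotic Surgery", 1)]),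
  ("hands-on work", [("Surgery", 2), ("Robotic Surgery", 1)]),
  ("no night shifts", [("Dermatology", 2), ("Radiology", 1)]),
  ("structured work hours", [("Dermatology", 2), ("Radiology", 1)]),
  ("infectious diseases", [("Tropical Medicine", 2)]),
  ("genetics", [("Human Genetics", 2)]),
  ("military medicine", [("Military Medicine", 2)]),
  ("rehabilitation", [("Rehabilitation Medicine", 2)]),
  ("geriatrics", [("Geriatrics", 2)]),
  ("occupational medicine", [("Occupational Medicine", 2)]),
  ("public health", [("Public Health", 2)]),
  ("pharmacology", [("Pharmacology", 2)]),
  ("aerospace medicine", [("Aerospace Medicine", 2)])]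

-- deltas = [d for k, v in answers.items() if v for d in RULES.get(k, ())]
def deltasB (answers : List (String × Bool)) : List (String × Int) :=
  answers.flatMap (fun kv => if kv.2 then rulesB.getD kv.1 [] else [])

-- the loop body: score = sum(p for sp, p in deltas if sp == s); if best is None or score > best_score: best, best_score = s, score
def stepB (deltas : List (String × Int)) (st : Option String × Int) (s : String) : Option String × Int :=
  let score := deltas.foldl (fun acc d => if d.1 == s then acc + d.2 else acc) 0
  match st.1 with
  | none => (some s, score)
  | some _ => if st.2 < score then (some s, score) else st

def calculate_specialty_alt (answers : List (String × Bool)) : String :=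
  let deltas := deltasB answers
  -- best = None; best_score = 0; for s in SPECIALTIES: ...
  let r := specialtiesB.foldl (stepB deltas) ((none : Option String), (0 : Int))
  r.1.getD ""

-- ===== PRECONDITION & SPEC =====
def Spec_calculate_specialty (answers : List (String × Bool)) (out : String) : Prop := out = calculate_specialty_alt answers
instance (answers : List (String × Bool)) (out : String) : Decidable (Spec_calculate_specialty answers out) := by unfold Spec_calculate_specialty; infer_instance

-- ===== CLAIM (what is proved, stated in full; the proofs are below) =====
def Claim_equal_calculate_specialty : Prop := ∀ (answers : List (String × Bool)), Dom_calculate_specialty answers → Spec_calculate_specialty answers (calculate_specialty answers)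

-- ===== LEMMAS AND PROOFS =====

-- B's per-specialty score of a delta list
def scoreOf (ds : List (String × Int)) (s : String) : Int :=
  ds.foldl (fun acc d => if d.1 == s then acc + d.2 else acc) 0

theorem score_shift (ds : List (String × Int)) (s : String) (a : Int) :
    ds.foldl (fun acc d => if d.1 == s then acc + d.2 else acc) a = a + scoreOf ds s := by
  induction ds generalizing a with
  | nil => simp [scoreOf]
  | cons hd tl ih =>
    show tl.foldl _ (if (hd.1 == s) = true then a + hd.2 else a) = a + scoreOf (hd :: tl) s
    have h2 : scoreOf (hd :: tl) s
        = tl.foldl (fun acc d => if d.1 == s then acc + d.2 else acc)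
            (if (hd.1 == s) = true then 0 + hd.2 else 0) := rfl
    by_cases h : (hd.1 == s) = true
    · rw [if_pos h, ih, h2, if_pos h, ih]; ring
    · rw [if_neg h, ih, h2, if_neg h, ih]; ring

theorem score_append (ds es : List (String × Int)) (s : String) :
    scoreOf (ds ++ es) s = scoreOf ds s + scoreOf es s := by
  show (ds ++ es).foldl _ 0 = _
  rw [List.foldl_append, score_shift]
  rfl

theorem score_cons (hd : String × Int) (tl : List (String × Int)) (s : String) :
    scoreOf (hd :: tl) s = (if (hd.1 == s) = true then hd.2 else 0) + scoreOf tl s := by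
  show tl.foldl _ (if (hd.1 == s) = true then 0 + hd.2 else 0) = _
  rw [score_shift]
  split_ifs <;> ring

-- folding the modify-updates of a delta list changes each getD by that list's score
theorem getD_foldl_deltas (ds : List (String × Int)) (d : PySem.Dict String Int) (s : String) :
    (ds.foldl (fun p sp => p.modify sp.1 0 (· + sp.2)) d).getD s 0 = d.getD s 0 + scoreOf ds s := by
  induction ds generalizing d with
  | nil => simp [scoreOf]
  | cons hd tl ih =>
    rw [List.foldl_cons, ih, score_cons]
    by_cases h : hd.1 = s
    · subst h
      rw [PySem.Dict.getD_modify_self, if_pos (by simp)]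
      ring
    · rw [PySem.Dict.getD_modify_of_ne _ _ _ (Ne.symm h), if_neg (by simp [h])]
      ring

-- A's branch chain equals the modify-fold over B's rule table, on every key
theorem stepA_eq_table (pts : PySem.Dict String Int) (key : String) :
    stepA pts key = (rulesB.getD key []).foldl (fun p sp => p.modify sp.1 0 (· + sp.2)) pts := by
  by_cases h1 : key = "quick decisions"; · subst h1; rfl
  by_cases h2 : key = "high-pressure work"; · subst h2; rfl
  by_cases h3 : key = "analytical thinking"; · subst h3; rfl
  by_cases h4 : key = "problem-solving"; · subst h4; rfl
  by_cases h5 : key = "patient interaction"; · subst h5; rfl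
  by_cases h6 : key = "long-term care"; · subst h6; rfl
  by_cases h7 : key = "operative procedures"; · subst h7; rfl
  by_cases h8 : key = "hands-on work"; · subst h8; rfl
  by_cases h9 : key = "no night shifts"; · subst h9; rfl
  by_cases h10 : key = "structured work hours"; · subst h10; rfl
  by_cases h11 : key = "infectious diseases"; · subst h11; rfl
  by_cases h12 : key = "genetics"; · subst h12; rfl
  by_cases h13 : key = "military medicine"; · subst h13; rfl
  by_cases h14 : key = "rehabilitation"; · subst h14; rfl
  by_cases h15 : key = "geriatrics"; · subst h15; rfl
  by_cases h16 : key = "occupational medicine"; · subst h16; rfl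
  by_cases h17 : key = "public health"; · subst h17; rfl
  by_cases h18 : key = "pharmacology"; · subst h18; rfl
  by_cases h19 : key = "aerospace medicine"; · subst h19; rfl
  have hg : rulesB.getD key [] = [] := by
    simp only [rulesB, PySem.Dict.getD, PySem.Dict.get?_mk_cons]
    simp [beq_eq_false_iff_ne.mpr (Ne.symm h1), beq_eq_false_iff_ne.mpr (Ne.symm h2),
      beq_eq_false_iff_ne.mpr (Ne.symm h3), beq_eq_false_iff_ne.mpr (Ne.symm h4),
      beq_eq_false_iff_ne.mpr (Ne.symm h5), beq_eq_false_iff_ne.mpr (Ne.symm h6),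
      beq_eq_false_iff_ne.mpr (Ne.symm h7), beq_eq_false_iff_ne.mpr (Ne.symm h8),
      beq_eq_false_iff_ne.mpr (Ne.symm h9), beq_eq_false_iff_ne.mpr (Ne.symm h10),
      beq_eq_false_iff_ne.mpr (Ne.symm h11), beq_eq_false_iff_ne.mpr (Ne.symm h12),
      beq_eq_false_iff_ne.mpr (Ne.symm h13), beq_eq_false_iff_ne.mpr (Ne.symm h14),
      beq_eq_false_iff_ne.mpr (Ne.symm h15), beq_eq_false_iff_ne.mpr (Ne.symm h16),
      beq_eq_false_iff_ne.mpr (Ne.symm h17), beq_eq_false_iff_ne.mpr (Ne.symm h18),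
      beq_eq_false_iff_ne.mpr (Ne.symm h19), PySem.Dict.get?]
  rw [hg]
  simp [stepA, h1, h2, h3, h4, h5, h6, h7, h8, h9, h10, h11, h12, h13, h14, h15, h16, h17, h18, h19]

-- every delta a rule produces targets one of the 21 specialties
theorem rules_target_mem (key : String) (sp : String × Int) (h : sp ∈ rulesB.getD key []) :
    sp.1 ∈ specialtiesB := by
  by_cases h1 : key = "quick decisions"
  · subst h1; rw [show rulesB.getD "quick decisions" [] = [("Emergency Medicine", 2)] by decide] at h
    fin_cases h <;> decide
  by_cases h2 : key = "high-pressure work"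
  · subst h2; rw [show rulesB.getD "high-pressure work" [] = [("Emergency Medicine", 2)] by decide] at h
    fin_cases h <;> decide
  by_cases h3 : key = "analytical thinking"
  · subst h3; rw [show rulesB.getD "analytical thinking" [] = [("Neurology", 2), ("Radiology", 2)] by decide] at h
    fin_cases h <;> decide
  by_cases h4 : key = "problem-solving"
  · subst h4; rw [show rulesB.getD "problem-solving" [] = [("Neurology", 2), ("Radiology", 2)] by decide] at h
    fin_cases h <;> decide
  by_cases h5 : key = "patient interaction"
  · subst h5; rw [show rulesB.getD "patient interaction" [] = [("General Medicine", 2), ("Psychiatry", 2)] by decide] at h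
    fin_cases h <;> decide
  by_cases h6 : key = "long-term care"
  · subst h6; rw [show rulesB.getD "long-term care" [] = [("General Medicine", 2), ("Psychiatry", 2)] by decide] at h
    fin_cases h <;> decide
  by_cases h7 : key = "operative procedures"
  · subst h7; rw [show rulesB.getD "operative procedures" [] = [("Surgery", 2), ("Robotic Surgery", 1)] by decide] at h
    fin_cases h <;> decide
  by_cases h8 : key = "hands-on work"
  · subst h8; rw [show rulesB.getD "hands-on work" [] = [("Surgery", 2), ("Robotic Surgery", 1)] by decide] at h
    fin_cases h <;> decide
  by_cases h9 : key = "no night shifts"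
  · subst h9; rw [show rulesB.getD "no night shifts" [] = [("Dermatology", 2), ("Radiology", 1)] by decide] at h
    fin_cases h <;> decide
  by_cases h10 : key = "structured work hours"
  · subst h10; rw [show rulesB.getD "structured work hours" [] = [("Dermatology", 2), ("Radiology", 1)] by decide] at h
    fin_cases h <;> decide
  by_cases h11 : key = "infectious diseases"
  · subst h11; rw [show rulesB.getD "infectious diseases" [] = [("Tropical Medicine", 2)] by decide] at h
    fin_cases h <;> decide
  by_cases h12 : key = "genetics"
  · subst h12; rw [show rulesB.getD "genetics" [] = [("Human Genetics", 2)] by decide] at h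
    fin_cases h <;> decide
  by_cases h13 : key = "military medicine"
  · subst h13; rw [show rulesB.getD "military medicine" [] = [("Military Medicine", 2)] by decide] at h
    fin_cases h <;> decide
  by_cases h14 : key = "rehabilitation"
  · subst h14; rw [show rulesB.getD "rehabilitation" [] = [("Rehabilitation Medicine", 2)] by decide] at h
    fin_cases h <;> decide
  by_cases h15 : key = "geriatrics"
  · subst h15; rw [show rulesB.getD "geriatrics" [] = [("Geriatrics", 2)] by decide] at h
    fin_cases h <;> decide
  by_cases h16 : key = "occupational medicine"
  · subst h16; rw [show rulesB.getD "occupational medicine" [] = [("Occupational Medicine", 2)] by decide] at h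
    fin_cases h <;> decide
  by_cases h17 : key = "public health"
  · subst h17; rw [show rulesB.getD "public health" [] = [("Public Health", 2)] by decide] at h
    fin_cases h <;> decide
  by_cases h18 : key = "pharmacology"
  · subst h18; rw [show rulesB.getD "pharmacology" [] = [("Pharmacology", 2)] by decide] at h
    fin_cases h <;> decide
  by_cases h19 : key = "aerospace medicine"
  · subst h19; rw [show rulesB.getD "aerospace medicine" [] = [("Aerospace Medicine", 2)] by decide] at h
    fin_cases h <;> decide
  have hg : rulesB.getD key [] = [] := by
    simp only [rulesB, PySem.Dict.getD, PySem.Dict.get?_mk_cons]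
    simp [beq_eq_false_iff_ne.mpr (Ne.symm h1), beq_eq_false_iff_ne.mpr (Ne.symm h2),
      beq_eq_false_iff_ne.mpr (Ne.symm h3), beq_eq_false_iff_ne.mpr (Ne.symm h4),
      beq_eq_false_iff_ne.mpr (Ne.symm h5), beq_eq_false_iff_ne.mpr (Ne.symm h6),
      beq_eq_false_iff_ne.mpr (Ne.symm h7), beq_eq_false_iff_ne.mpr (Ne.symm h8),
      beq_eq_false_iff_ne.mpr (Ne.symm h9), beq_eq_false_iff_ne.mpr (Ne.symm h10),
      beq_eq_false_iff_ne.mpr (Ne.symm h11), beq_eq_false_iff_ne.mpr (Ne.symm h12),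
      beq_eq_false_iff_ne.mpr (Ne.symm h13), beq_eq_false_iff_ne.mpr (Ne.symm h14),
      beq_eq_false_iff_ne.mpr (Ne.symm h15), beq_eq_false_iff_ne.mpr (Ne.symm h16),
      beq_eq_false_iff_ne.mpr (Ne.symm h17), beq_eq_false_iff_ne.mpr (Ne.symm h18),
      beq_eq_false_iff_ne.mpr (Ne.symm h19), PySem.Dict.get?]
  rw [hg] at h
  simp at h

-- the modify-fold over a delta list whose targets are existing keys preserves the key list
theorem keys_foldl_deltas (ds : List (String × Int)) (d : PySem.Dict String Int)
    (h : ∀ sp ∈ ds, sp.1 ∈ d.keys) :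
    (ds.foldl (fun p sp => p.modify sp.1 0 (· + sp.2)) d).keys = d.keys := by
  induction ds generalizing d with
  | nil => rfl
  | cons hd tl ih =>
    have hk : (d.modify hd.1 0 (· + hd.2)).keys = d.keys := by
      rw [PySem.Dict.keys_modify, PySem.Dict.keys_insert_of_contains]
      exact (PySem.Dict.contains_iff_mem_keys d hd.1).mpr (h hd (by simp))
    rw [List.foldl_cons, ih _ (by intro sp hsp; rw [hk]; exact h sp (by simp [hsp])), hk]

-- A's loop: keys stay the 21 specialties
theorem keysA (answers : List (String × Bool)) :
    (answers.foldl (fun pts kv => if kv.2 then stepA pts kv.1 else pts) initPointsA).keys = specialtiesB := by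
  have base : initPointsA.keys = specialtiesB := by decide
  suffices h : ∀ (l : List (String × Bool)) (d : PySem.Dict String Int), d.keys = specialtiesB →
      (l.foldl (fun pts kv => if kv.2 = true then stepA pts kv.1 else pts) d).keys = specialtiesB by
    exact h answers initPointsA base
  intro l
  induction l with
  | nil => intro d hdk; exact hdk
  | cons kv tl ih =>
    intro d hdk
    rw [List.foldl_cons]
    apply ih
    by_cases hv : kv.2 = true
    · rw [if_pos hv, stepA_eq_table,
        keys_foldl_deltas _ _ (by intro sp hsp; rw [hdk]; exact rules_target_mem kv.1 sp hsp)]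
      exact hdk
    · rw [if_neg hv]; exact hdk

-- A's loop: each specialty's final score is the score of the flattened delta list
theorem getDA (answers : List (String × Bool)) (d : PySem.Dict String Int) (s : String) :
    (answers.foldl (fun pts kv => if kv.2 then stepA pts kv.1 else pts) d).getD s 0
      = d.getD s 0 + scoreOf (deltasB answers) s := by
  induction answers generalizing d with
  | nil => simp [deltasB, scoreOf]
  | cons kv tl ih =>
    rw [List.foldl_cons]
    have hflat : deltasB (kv :: tl) = (if kv.2 = true then rulesB.getD kv.1 [] else []) ++ deltasB tl := by
      simp [deltasB]
    rw [hflat, score_append]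
    by_cases hv : kv.2 = true
    · rw [if_pos hv, if_pos hv, ih, stepA_eq_table, getD_foldl_deltas]; ring
    · rw [if_neg hv, if_neg hv, ih]
      show _ = d.getD s 0 + (scoreOf [] s + scoreOf (deltasB tl) s)
      rw [show scoreOf [] s = 0 from rfl]
      ring

-- a literal dict whose stored values are all 0 yields 0 on every lookup
theorem getD_zero_of_all : ∀ (l : List (String × Int)), (∀ p ∈ l, p.2 = 0) → ∀ s : String,
    (PySem.Dict.mk l).getD s 0 = 0
  | [], _, s => rfl
  | (k, v) :: tl, h, s => by
    rw [PySem.Dict.getD, PySem.Dict.get?_mk_cons]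
    by_cases hk : (k == s) = true
    · rw [if_pos hk]
      have hv : v = 0 := by simpa using h (k, v) (by simp)
      simp [hv]
    · rw [if_neg hk]
      exact getD_zero_of_all tl (fun p hp => h p (by simp [hp])) s

-- all initial scores are 0
theorem init_getD (s : String) : initPointsA.getD s 0 = 0 :=
  getD_zero_of_all _ (by decide) s

-- the fold PySem.List.max? is defined by
def maxStep (f : String → Int) (acc : Option String) (x : String) : Option String :=
  match acc with
  | none => some x
  | some m => if f m < f x then some x else some m

theorem max?_eq_foldl (xs : List String) (f : String → Int) :
    PySem.List.max? xs f = xs.foldl (maxStep f) none := by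
  rw [PySem.List.max?]
  apply PySem.List.foldl_congr_mem
  intro acc x _
  cases acc <;> rfl

-- B's running argmax scan computes the first maximum
theorem scan_eq_max (deltas : List (String × Int)) (xs : List String) (m : String) :
    (xs.foldl (stepB deltas) (some m, scoreOf deltas m)).1
      = xs.foldl (maxStep (fun s => scoreOf deltas s)) (some m) := by
  induction xs generalizing m with
  | nil => rfl
  | cons hd tl ih =>
    have e1 : stepB deltas (some m, scoreOf deltas m) hd
        = if scoreOf deltas m < scoreOf deltas hd then (some hd, scoreOf deltas hd)
          else (some m, scoreOf deltas m) := rfl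
    have e2 : maxStep (fun s => scoreOf deltas s) (some m) hd
        = if scoreOf deltas m < scoreOf deltas hd then some hd else some m := rfl
    rw [List.foldl_cons, List.foldl_cons, e1, e2]
    by_cases h : scoreOf deltas m < scoreOf deltas hd
    · rw [if_pos h, if_pos h]; exact ih hd
    · rw [if_neg h, if_neg h]; exact ih m

theorem scan_eq_max' (deltas : List (String × Int)) (xs : List String) :
    (xs.foldl (stepB deltas) ((none : Option String), (0 : Int))).1
      = xs.foldl (maxStep (fun s => scoreOf deltas s)) none := by
  cases xs with
  | nil => rfl
  | cons hd tl =>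
    have e1 : stepB deltas ((none : Option String), (0 : Int)) hd = (some hd, scoreOf deltas hd) := rfl
    have e2 : maxStep (fun s => scoreOf deltas s) none hd = some hd := rfl
    rw [List.foldl_cons, List.foldl_cons, e1, e2]
    exact scan_eq_max deltas tl hd

-- B computes the first maximum of the per-specialty scores
theorem alt_eq_max (answers : List (String × Bool)) :
    calculate_specialty_alt answers
      = (PySem.List.max? specialtiesB (fun s => scoreOf (deltasB answers) s)).getD "" := by
  rw [max?_eq_foldl]
  exact congrArg (fun o => o.getD "") (scan_eq_max' (deltasB answers) specialtiesB)

-- ===== VERDICT (by name: the statement is the Claim_ definition above) =====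
theorem calculate_specialty_spec : Claim_equal_calculate_specialty := by
  intro answers _
  unfold Spec_calculate_specialty
  rw [alt_eq_max]
  show (PySem.List.max?
      (answers.foldl (fun pts kv => if kv.2 then stepA pts kv.1 else pts) initPointsA).keys
      (fun k => (answers.foldl (fun pts kv => if kv.2 then stepA pts kv.1 else pts) initPointsA).getD k 0)).getD ""
    = _
  rw [keysA]
  have hfun : (fun k => (answers.foldl (fun pts kv => if kv.2 then stepA pts kv.1 else pts) initPointsA).getD k 0)
      = fun s => scoreOf (deltasB answers) s := by
    funext k
    rw [getDA, init_getD, zero_add]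
  rw [hfun]
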